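-- pv_equiv track=rewrite | github.com/RuslanTsykaliak/LeetCode-TypeScript-JS-Python-Java | 2145-count-the-hidden-sequences/2145-count-the-hidden-sequences.py | numberOfArrays
-- ===== SOURCE A (Python) =====
-- from typing import List
--
-- def numberOfArrays(differences: List[int], lower: int, upper: int) -> int:
--     # Beats 62.63%
--     # x = y = cur = 0
--     # for d in differences:
--     #     cur += d
--     #     x = min(x, cur)
--     #     y = max(y, cur)
--     #     if y - x > upper - lower:
--     #         return 0
--     # return (upper - lower) - (y - x) + 1
--
--     #### Beats 92.93%
--     # pfs = list(accumulate(differences, initial = 0))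
--     # return max(0, upper - lower - max(pfs) + min(pfs) + 1)
--
--     #### Beats 94.95%
--
--     # lowest = 0
--     # highest = 0
--     # current = 0
--     # for i in differences:
--     #     current += i
--     #     if lowest > current:
--     #         lowest = current
--     #     if highest < current:
--     #         highest = current
--     # differences_range = highest - lowest
--     # given_range = upper - lower
--     # res = (given_range - differences_range + 1)
--     # if res > 0:
--     #     return res
--     # else:
--     #     return 0
--
--     #### Beats 48.48%
--     # Track prefix‐sum extremities (relative to hidden[0])
--     # lowest = highest = curr = 0
--     # for d in differences:
--     #     curr += d
--     #     lowest = min(lowest, curr)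
--     #     highest = max(highest, curr)
--
--     # # The hidden sequence spans a range of (highest – lowest).
--     # # We can slide that range inside [lower, upper]:
--     # span = highest - lowest
--     # full_range = upper - lower
--
--     # # Number of valid starting values = (full_range – span + 1), floored at 0
--     # return max(0, full_range - span + 1)
--
--
--     #### 35.35 %
--     # min_val = max_val = curr = 0
--     # for diff in differences:
--     #     curr += diff
--     #     min_val = min(min_val, curr)
--     #     max_val = max(max_val, curr)
--
--     # required_range = max_val - min_val
--     # available_range = upper - lower
--     # possible_starts = available_range - required_range + 1
--
--     # return max(0, possible_starts)
--
--     #### 95.96%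
--     # lowest = highest = current = 0
--     # for diff in differences:
--     #     current += diff
--     #     if current < lowest:
--     #         lowest = current
--     #     if current > highest:
--     #         highest = current
--
--     # differences_range = highest - lowest
--     # given_range = upper - lower
--     # res = (given_range - differences_range + 1)
--
--     # return max(0, res)
--
--     #### 86.87
--     # current = min_sum = max_sum = 0
--     # for d in differences:
--     #     current += d
--     #     if current < min_sum:
--     #         min_sum = current
--     #     if current > max_sum:
--     #         max_sum = current
--     # range_ = max_sum - min_sum
--     # available = (upper - lower) - range_ + 1
--     # return max(0, available)
--
--     ####
--     lowest = highest = current = 0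
--     for diff in differences:
--         current += diff
--         lowest = min(lowest, current)
--         highest = max(highest, current)
--     valid_x = (upper - highest) - (lower - lowest) + 1
--     return max(0, valid_x)
-- ===== SOURCE B (Python) =====
-- def numberOfArrays(differences, lower, upper):
--     # Interval-narrowing algorithm: walk the differences right-to-left,
--     # maintaining the interval [lo, hi] of starting values that keep the
--     # remaining suffix of the hidden sequence inside [lower, upper].
--     # No prefix sums or running extremes are computed.
--     lo, hi = lower, upper
--     for d in reversed(differences):
--         lo = max(lower, lo - d)
--         hi = min(upper, hi - d)
--     return max(0, hi - lo + 1)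
-- ===== Notes on version B (the rewrite author's own statement) =====
-- stated objective: alternative
-- what changed: Replaces the forward prefix-sum pass with running min/max extremes by a backward interval-narrowing pass that intersects the feasible interval of starting values; no prefix sums or extremes are computed.
import Mathlib
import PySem

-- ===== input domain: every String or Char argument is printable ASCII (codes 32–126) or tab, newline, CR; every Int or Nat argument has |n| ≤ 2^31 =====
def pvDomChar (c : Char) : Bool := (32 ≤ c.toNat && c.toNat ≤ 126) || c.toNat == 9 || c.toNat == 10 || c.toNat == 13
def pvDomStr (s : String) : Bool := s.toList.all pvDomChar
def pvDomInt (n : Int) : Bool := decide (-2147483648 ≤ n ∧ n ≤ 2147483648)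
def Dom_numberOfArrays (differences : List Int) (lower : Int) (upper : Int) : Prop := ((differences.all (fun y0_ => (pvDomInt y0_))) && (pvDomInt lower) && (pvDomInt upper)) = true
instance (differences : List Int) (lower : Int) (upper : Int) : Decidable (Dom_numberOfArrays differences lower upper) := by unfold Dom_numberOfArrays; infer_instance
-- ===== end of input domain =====

-- B changes the algorithm: a backward interval-narrowing pass over the differences instead of
-- A's forward prefix-sum pass with running min/max extremes ('alternative', same cost).

-- ===== PORT A =====
def numberOfArrays (differences : List Int) (lower : Int) (upper : Int) : Int :=
  let st := differences.foldl
    (fun (s : Int × Int × Int) diff =>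
      let current := s.2.2 + diff
      (min s.1 current, max s.2.1 current, current))
    (0, 0, 0)
  let valid_x := (upper - st.2.1) - (lower - st.1) + 1
  max 0 valid_x

-- ===== PORT B =====
-- Source B's 'for d in reversed(differences)' loop narrowing the feasible interval [lo, hi]
def numberOfArrays_alt (differences : List Int) (lower : Int) (upper : Int) : Int :=
  let p := differences.reverse.foldl
    (fun (p : Int × Int) d => (max lower (p.1 - d), min upper (p.2 - d)))
    (lower, upper)
  max 0 (p.2 - p.1 + 1)

-- ===== PRECONDITION & SPEC =====
def Spec_numberOfArrays (differences : List Int) (lower : Int) (upper : Int) (out : Int) : Prop := out = numberOfArrays_alt differences lower upper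
instance (differences : List Int) (lower : Int) (upper : Int) (out : Int) : Decidable (Spec_numberOfArrays differences lower upper out) := by unfold Spec_numberOfArrays; infer_instance

-- ===== CLAIM (what is proved, stated in full; the proofs are below) =====
def Claim_equal_numberOfArrays : Prop := ∀ (differences : List Int) (lower : Int) (upper : Int), Dom_numberOfArrays differences lower upper → Spec_numberOfArrays differences lower upper (numberOfArrays differences lower upper)

-- ===== LEMMAS AND PROOFS =====

-- minimum / maximum of the prefix sums of ds (empty prefix included)
def pvMnS : List Int → Int
  | [] => 0
  | d :: ds => min 0 (d + pvMnS ds)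

def pvMxS : List Int → Int
  | [] => 0
  | d :: ds => max 0 (d + pvMxS ds)

theorem pvMnS_nonpos (ds : List Int) : pvMnS ds ≤ 0 := by
  cases ds with
  | nil => simp [pvMnS]
  | cons d ds => simp [pvMnS]

theorem pvMxS_nonneg (ds : List Int) : 0 ≤ pvMxS ds := by
  cases ds with
  | nil => simp [pvMxS]
  | cons d ds => simp [pvMxS]

theorem pv_foldl_add_shift (ds : List Int) : ∀ (c : Int),
    ds.foldl (fun a b => a + b) c = c + ds.foldl (fun a b => a + b) 0 := by
  induction ds with
  | nil => intro c; simp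
  | cons e es ih =>
    intro c
    simp only [List.foldl]
    rw [ih (c + e), ih (0 + e)]
    ring

-- A's fused loop computes (min, max) over the prefix sums
theorem pv_fold_A (ds : List Int) : ∀ (l h c : Int), l ≤ c → c ≤ h →
    ds.foldl (fun (s : Int × Int × Int) diff =>
      let current := s.2.2 + diff
      (min s.1 current, max s.2.1 current, current)) (l, h, c)
    = (min l (c + pvMnS ds), max h (c + pvMxS ds),
       c + (ds.foldl (fun a b => a + b) 0)) := by
  induction ds with
  | nil =>
    intro l h c hl hc
    simp [pvMnS, pvMxS]
    omega
  | cons d ds ih =>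
    intro l h c hl hc
    simp only [List.foldl]
    rw [ih (min l (c + d)) (max h (c + d)) (c + d) (by omega) (by omega)]
    have h1 := pvMnS_nonpos ds
    have h2 := pvMxS_nonneg ds
    refine Prod.ext ?_ (Prod.ext ?_ ?_)
    · simp [pvMnS]; omega
    · simp [pvMxS]; omega
    · rw [pv_foldl_add_shift ds (0 + d)]
      ring

-- B's backward pass computes (lower - mnS, upper - mxS)
theorem pv_fold_B (lower upper : Int) (ds : List Int) :
    ds.reverse.foldl (fun (p : Int × Int) d => (max lower (p.1 - d), min upper (p.2 - d)))
      (lower, upper)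
    = (lower - pvMnS ds, upper - pvMxS ds) := by
  rw [List.foldl_reverse]
  induction ds with
  | nil => simp [pvMnS, pvMxS]
  | cons d ds ih =>
    simp only [List.foldr, ih, pvMnS, pvMxS]
    refine Prod.ext ?_ ?_ <;> simp <;> omega

-- ===== VERDICT (by name: the statement is the Claim_ definition above) =====
theorem numberOfArrays_spec : Claim_equal_numberOfArrays := by
  intro differences lower upper _
  unfold Spec_numberOfArrays numberOfArrays numberOfArrays_alt
  rw [pv_fold_A differences 0 0 0 le_rfl le_rfl, pv_fold_B]
  have h1 := pvMnS_nonpos differences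
  have h2 := pvMxS_nonneg differences
  simp only []
  have : min 0 (0 + pvMnS differences) = pvMnS differences := by omega
  have : max 0 (0 + pvMxS differences) = pvMxS differences := by omega
  omega
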